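-- pv_equiv track=rewrite | github.com/zhuli19901106/leetcode-zhuli | algorithms/1501-2000/1717_maximum-score-from-removing-substrings_1_AC.py | removeSubstring
-- ===== SOURCE A (Python) =====
-- def removeSubstring(s, x, p):
--     res = 0
--     st = []
--     for c in s:
--         st.append(c)
--         if len(st) >= 2 and st[-2] == p[0] and st[-1] == p[1]:
--             res += x
--             st.pop()
--             st.pop()
--     return res, ''.join(st)
-- ===== SOURCE B (Python) =====
-- def removeSubstring(s, x, p):
--     pat = p[0] + p[1]
--     res = 0
--     while True:
--         i = s.find(pat)
--         if i < 0:
--             return res, s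
--         s = s[:i] + s[i + 2:]
--         res += x
-- ===== Notes on version B (the rewrite author's own statement) =====
-- stated objective: alternative
-- what changed: Replaces the single-pass stack with repeated leftmost find-and-splice of the two-char pattern, relying on confluence of deleting a fixed 2-char substring.
-- outside the precondition, e.g. on removeSubstring('xy', 5, 'a'): A returns (0, 'xy'), B raises IndexError; on removeSubstring('a', 3, ''): A returns (0, 'a'), B raises IndexError
import Mathlib
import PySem

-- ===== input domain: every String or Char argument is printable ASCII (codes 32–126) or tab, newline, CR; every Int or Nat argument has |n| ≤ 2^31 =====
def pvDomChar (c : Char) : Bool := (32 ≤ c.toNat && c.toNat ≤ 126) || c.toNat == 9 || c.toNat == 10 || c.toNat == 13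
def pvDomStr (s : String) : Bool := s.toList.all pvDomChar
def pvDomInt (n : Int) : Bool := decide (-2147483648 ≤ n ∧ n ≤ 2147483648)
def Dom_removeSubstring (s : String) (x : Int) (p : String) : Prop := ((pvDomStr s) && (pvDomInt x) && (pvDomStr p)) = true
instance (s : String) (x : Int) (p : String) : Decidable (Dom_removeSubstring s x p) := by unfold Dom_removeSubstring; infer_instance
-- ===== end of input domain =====

-- B replaces A's single-pass stack scan with repeated leftmost removal of the two-char
-- pattern (find-and-splice); same results by confluence of deleting a fixed 2-char substring.

-- ===== PORT A =====
-- the stack is kept head-first (head = Python st[-1]); ''.join(st) = String.mk of its reverse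
def pvStep (p0 p1 : Char) (x : Int) (acc : Int × List Char) (c : Char) : Int × List Char :=
  match acc.2 with
  | a :: rest => if a = p0 ∧ c = p1 then (acc.1 + x, rest) else (acc.1, c :: a :: rest)
  | [] => (acc.1, [c])

def removeSubstring (s : String) (x : Int) (p : String) : Int × String :=
  let p0 := p.toList.getD 0 ' '   -- p[0] (Pre_ guarantees it exists)
  let p1 := p.toList.getD 1 ' '   -- p[1]
  let r := s.toList.foldl (pvStep p0 p1 x) (0, [])
  (r.1, String.mk r.2.reverse)

-- ===== PORT B =====
-- port of s.find(p[0]+p[1]): index of the leftmost adjacent occurrence (none = -1)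
def pvFindPair (p0 p1 : Char) : List Char → Option Nat
  | a :: b :: rest => if a = p0 ∧ b = p1 then some 0 else (pvFindPair p0 p1 (b :: rest)).map (· + 1)
  | _ => none

-- needed by pvLoop's termination proof
theorem pvFindPair_some_le (p0 p1 : Char) : ∀ (l : List Char) (i : Nat),
    pvFindPair p0 p1 l = some i → i + 2 ≤ l.length
  | a :: b :: rest, i => by
    simp only [pvFindPair]
    split
    · rintro ⟨rfl⟩; simp
    · intro h
      obtain ⟨j, hj, rfl⟩ := Option.map_eq_some_iff.mp h
      have := pvFindPair_some_le p0 p1 (b :: rest) j hj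
      simpa [Nat.succ_le_succ] using Nat.succ_le_succ this
  | [], i => by simp [pvFindPair]
  | [a], i => by simp [pvFindPair]

-- the while loop of B: splice out the leftmost occurrence, add x, repeat
def pvLoop (p0 p1 : Char) (x : Int) (res : Int) (l : List Char) : Int × List Char :=
  match h : pvFindPair p0 p1 l with
  | none => (res, l)
  | some i => pvLoop p0 p1 x (res + x) (l.take i ++ l.drop (i + 2))
termination_by l.length
decreasing_by
  have := pvFindPair_some_le p0 p1 l i h
  simp [List.length_take, List.length_drop]
  omega

def removeSubstring_alt (s : String) (x : Int) (p : String) : Int × String :=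
  let p0 := p.toList.getD 0 ' '   -- p[0]
  let p1 := p.toList.getD 1 ' '   -- p[1]
  let r := pvLoop p0 p1 x 0 s.toList
  (r.1, String.mk r.2)

-- ===== PRECONDITION & SPEC =====
-- Pre_ excludes p of length < 2: there Python A raises IndexError whenever st[-2]==p[0]
-- fires (and its returning at all otherwise is accidental short-circuiting), while B's
-- p[0]+p[1] always raises IndexError.
def Pre_removeSubstring (s : String) (x : Int) (p : String) : Prop := 2 ≤ p.toList.length
instance (s : String) (x : Int) (p : String) : Decidable (Pre_removeSubstring s x p) := by unfold Pre_removeSubstring; infer_instance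
def pvWitness_removeSubstring : String × Int × String := ("cabbac", 3, "ab")

def Spec_removeSubstring (s : String) (x : Int) (p : String) (out : Int × String) : Prop := out = removeSubstring_alt s x p
instance (s : String) (x : Int) (p : String) (out : Int × String) : Decidable (Spec_removeSubstring s x p out) := by unfold Spec_removeSubstring; infer_instance

-- ===== CLAIM (what is proved, stated in full; the proofs are below) =====
def Claim_equal_removeSubstring : Prop := ∀ (s : String) (x : Int) (p : String), Dom_removeSubstring s x p → Pre_removeSubstring s x p → Spec_removeSubstring s x p (removeSubstring s x p)

-- ===== LEMMAS AND PROOFS =====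

-- a list containing an adjacent p0,p1 has a pair
theorem pvFindPair_append_pair (p0 p1 : Char) : ∀ (u v : List Char),
    pvFindPair p0 p1 (u ++ p0 :: p1 :: v) ≠ none
  | [], v => by simp [pvFindPair]
  | [a], v => by
    simp only [List.cons_append, List.nil_append, pvFindPair]
    split
    · simp
    · simp
  | a :: b :: u, v => by
    simp only [List.cons_append, pvFindPair]
    split
    · simp
    · have := pvFindPair_append_pair p0 p1 (b :: u) v
      simp only [List.cons_append] at this
      simpa using this

-- no pair in a prefix
theorem pvFindPair_none_append (p0 p1 : Char) : ∀ (u v : List Char),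
    pvFindPair p0 p1 (u ++ v) = none → pvFindPair p0 p1 u = none
  | [], v => by simp [pvFindPair]
  | [a], v => by simp [pvFindPair]
  | a :: b :: u, v => by
    simp only [List.cons_append, pvFindPair]
    split
    · simp
    · intro h
      have h' : pvFindPair p0 p1 ((b :: u) ++ v) = none := by
        simpa using h
      simpa using pvFindPair_none_append p0 p1 (b :: u) v h'

-- result counter is additive in the initial value
theorem pvFoldl_add (p0 p1 : Char) (x : Int) : ∀ (w : List Char) (r : Int) (st : List Char),
    List.foldl (pvStep p0 p1 x) (r, st) w
      = ((List.foldl (pvStep p0 p1 x) (0, st) w).1 + r, (List.foldl (pvStep p0 p1 x) (0, st) w).2)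
  | [], r, st => by simp
  | c :: w, r, st => by
    have hstep : pvStep p0 p1 x (r, st) c
        = ((pvStep p0 p1 x (0, st) c).1 + r, (pvStep p0 p1 x (0, st) c).2) := by
      cases st with
      | nil => simp [pvStep]
      | cons a rest => by_cases h : a = p0 ∧ c = p1 <;> simp [pvStep, h] <;> ring
    simp only [List.foldl_cons, hstep]
    rw [pvFoldl_add p0 p1 x w ((pvStep p0 p1 x (0, st) c).1 + r),
        pvFoldl_add p0 p1 x w (pvStep p0 p1 x (0, st) c).1 (pvStep p0 p1 x (0, st) c).2]
    simp only [Prod.mk.injEq]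
    exact ⟨by ring, by trivial⟩

-- folding a pair-free stretch just pushes it: the stack is the reverse of the processed prefix
theorem pvFoldl_noPair (p0 p1 : Char) (x : Int) : ∀ (w pref : List Char) (r : Int),
    pvFindPair p0 p1 (pref ++ w) = none →
    List.foldl (pvStep p0 p1 x) (r, pref.reverse) w = (r, (pref ++ w).reverse)
  | [], pref, r, _ => by simp
  | c :: w, pref, r, h => by
    have hpush : pvStep p0 p1 x (r, pref.reverse) c = (r, (pref ++ [c]).reverse) := by
      rcases hp : pref.reverse with _ | ⟨a, rest⟩
      · have : pref = [] := by simpa using congrArg List.reverse hp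
        simp [this, pvStep]
      · have hpref : pref = rest.reverse ++ [a] := by
          have := congrArg List.reverse hp
          simpa using this
        have hnp : ¬ (a = p0 ∧ c = p1) := by
          rintro ⟨rfl, rfl⟩
          exact pvFindPair_append_pair _ _ rest.reverse w (by simpa [hpref] using h)
        simp [pvStep, hnp, hpref]
    have h' : pvFindPair p0 p1 ((pref ++ [c]) ++ w) = none := by simpa using h
    have := pvFoldl_noPair p0 p1 x w (pref ++ [c]) r h'
    simp only [List.foldl_cons, hpush]
    rw [this]
    simp

-- decomposition at the leftmost occurrence, with minimality
theorem pvFindPair_some_decomp (p0 p1 : Char) : ∀ (l : List Char) (i : Nat),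
    pvFindPair p0 p1 l = some i →
    l.take i ++ p0 :: p1 :: l.drop (i + 2) = l ∧ pvFindPair p0 p1 (l.take (i + 1)) = none
  | a :: b :: rest, i => by
    simp only [pvFindPair]
    split
    · rename_i hab
      rintro ⟨rfl⟩
      obtain ⟨rfl, rfl⟩ := hab
      simp [pvFindPair]
    · rename_i hab
      intro h
      obtain ⟨j, hj, rfl⟩ := Option.map_eq_some_iff.mp h
      obtain ⟨hdec, hnone⟩ := pvFindPair_some_decomp p0 p1 (b :: rest) j hj
      refine ⟨?_, ?_⟩
      · simpa using congrArg (a :: ·) hdec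
      · have htab : (a :: b :: rest).take (j + 1 + 1) = a :: (b :: rest).take (j + 1) := rfl
        rw [htab]
        rcases htk : (b :: rest).take (j + 1) with _ | ⟨c, tl⟩
        · simp at htk
        · have hc : c = b := by
            have : (b :: rest).take (j + 1) = b :: rest.take j := by simp
            rw [this] at htk; exact (List.cons_eq_cons.mp htk).1.symm
          subst hc
          rw [htk] at hnone
          simp [pvFindPair, hab, hnone]
  | [], i => by simp [pvFindPair]
  | [a], i => by simp [pvFindPair]

-- one stack pass over u ++ p0::p1::v (leftmost occurrence at |u|) = x + one pass over u ++ v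
theorem pvStack_splice (p0 p1 : Char) (x : Int) (u v : List Char)
    (h : pvFindPair p0 p1 (u ++ [p0]) = none) :
    List.foldl (pvStep p0 p1 x) (0, []) (u ++ p0 :: p1 :: v)
      = ((List.foldl (pvStep p0 p1 x) (0, []) (u ++ v)).1 + x,
         (List.foldl (pvStep p0 p1 x) (0, []) (u ++ v)).2) := by
  have hu : pvFindPair p0 p1 u = none := pvFindPair_none_append p0 p1 u [p0] h
  have hfu : ∀ r : Int, List.foldl (pvStep p0 p1 x) (r, []) u = (r, u.reverse) := by
    intro r
    have := pvFoldl_noPair p0 p1 x u [] r (by simpa using hu)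
    simpa using this
  have hfu0 : List.foldl (pvStep p0 p1 x) ((0 : Int), ([] : List Char)) (u ++ [p0]) = (0, (u ++ [p0]).reverse) := by
    have := pvFoldl_noPair p0 p1 x (u ++ [p0]) [] 0 (by simpa using h)
    simpa using this
  have hpop : pvStep p0 p1 x (0, (u ++ [p0]).reverse) p1 = (x, u.reverse) := by
    simp [pvStep]
  calc List.foldl (pvStep p0 p1 x) (0, []) (u ++ p0 :: p1 :: v)
      = List.foldl (pvStep p0 p1 x) (pvStep p0 p1 x (List.foldl (pvStep p0 p1 x) (0, []) (u ++ [p0])) p1) v := by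
        rw [show u ++ p0 :: p1 :: v = (u ++ [p0]) ++ p1 :: v by simp, List.foldl_append]
        rfl
    _ = List.foldl (pvStep p0 p1 x) (x, u.reverse) v := by rw [hfu0, hpop]
    _ = ((List.foldl (pvStep p0 p1 x) (0, u.reverse) v).1 + x, (List.foldl (pvStep p0 p1 x) (0, u.reverse) v).2) :=
        pvFoldl_add p0 p1 x v x u.reverse
    _ = ((List.foldl (pvStep p0 p1 x) (0, []) (u ++ v)).1 + x, (List.foldl (pvStep p0 p1 x) (0, []) (u ++ v)).2) := by
        rw [List.foldl_append, hfu 0]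

-- unfolding equations for the while loop
theorem pvLoop_eq_none (p0 p1 : Char) (x r : Int) (l : List Char)
    (h : pvFindPair p0 p1 l = none) : pvLoop p0 p1 x r l = (r, l) := by
  rw [pvLoop]
  split <;> simp_all

theorem pvLoop_eq_some (p0 p1 : Char) (x r : Int) (l : List Char) (i : Nat)
    (h : pvFindPair p0 p1 l = some i) :
    pvLoop p0 p1 x r l = pvLoop p0 p1 x (r + x) (l.take i ++ l.drop (i + 2)) := by
  rw [pvLoop]
  split <;> simp_all

-- the loop's counter is additive in the initial value
theorem pvLoop_add (p0 p1 : Char) (x : Int) : ∀ (n : Nat) (l : List Char), l.length ≤ n → ∀ (r : Int),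
    pvLoop p0 p1 x r l = ((pvLoop p0 p1 x 0 l).1 + r, (pvLoop p0 p1 x 0 l).2)
  | 0, l, hl => by
    have hnil : l = [] := by cases l <;> simp_all
    subst hnil
    intro r
    rw [pvLoop_eq_none p0 p1 x r [] rfl, pvLoop_eq_none p0 p1 x 0 [] rfl]
    simp
  | n + 1, l, hl => by
    intro r
    rcases hfp : pvFindPair p0 p1 l with _ | i
    · rw [pvLoop_eq_none p0 p1 x r l hfp, pvLoop_eq_none p0 p1 x 0 l hfp]
      simp
    · have hlen : i + 2 ≤ l.length := pvFindPair_some_le p0 p1 l i hfp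
      have hlen' : (l.take i ++ l.drop (i + 2)).length ≤ n := by
        simp [List.length_take, List.length_drop]; omega
      rw [pvLoop_eq_some p0 p1 x r l i hfp, pvLoop_eq_some p0 p1 x 0 l i hfp]
      rw [pvLoop_add p0 p1 x n _ hlen' (r + x), pvLoop_add p0 p1 x n _ hlen' (0 + x)]
      simp only [Prod.mk.injEq]
      exact ⟨by ring, by trivial⟩

-- main list-level equivalence: the stack pass equals repeated leftmost splicing
theorem pvMain (p0 p1 : Char) (x : Int) : ∀ (n : Nat) (l : List Char), l.length ≤ n →
    List.foldl (pvStep p0 p1 x) (0, []) l = ((pvLoop p0 p1 x 0 l).1, (pvLoop p0 p1 x 0 l).2.reverse)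
  | 0, l, hl => by
    have hnil : l = [] := by cases l <;> simp_all
    subst hnil
    rw [pvLoop_eq_none p0 p1 x 0 [] rfl]
    simp
  | n + 1, l, hl => by
    rcases hfp : pvFindPair p0 p1 l with _ | i
    · rw [pvLoop_eq_none p0 p1 x 0 l hfp]
      have := pvFoldl_noPair p0 p1 x l [] 0 (by simpa using hfp)
      simpa using this
    · obtain ⟨hdec, hnone⟩ := pvFindPair_some_decomp p0 p1 l i hfp
      have hlen : i + 2 ≤ l.length := pvFindPair_some_le p0 p1 l i hfp
      have h1 : (l.take i).length = i := by simp; omega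
      have htk1 : l.take (i + 1) = l.take i ++ [p0] := by
        conv_lhs => rw [← hdec]
        rw [List.take_append]
        simp [h1]
      have hsp := pvStack_splice p0 p1 x (l.take i) (l.drop (i + 2)) (htk1 ▸ hnone)
      have hlen' : (l.take i ++ l.drop (i + 2)).length ≤ n := by
        simp [List.length_take, List.length_drop]; omega
      have ih := pvMain p0 p1 x n (l.take i ++ l.drop (i + 2)) hlen'
      rw [pvLoop_eq_some p0 p1 x 0 l i hfp]
      rw [pvLoop_add p0 p1 x n (l.take i ++ l.drop (i + 2)) hlen' (0 + x)]
      conv_lhs => rw [← hdec]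
      rw [hsp, ih]
      simp only [Prod.mk.injEq]
      exact ⟨by ring, by trivial⟩

-- ===== VERDICT (by name: the statement is the Claim_ definition above) =====
theorem removeSubstring_spec : Claim_equal_removeSubstring := by
  intro s x p _ _
  unfold Spec_removeSubstring removeSubstring removeSubstring_alt
  have := pvMain (p.toList.getD 0 ' ') (p.toList.getD 1 ' ') x s.toList.length s.toList le_rfl
  simp only [this, List.reverse_reverse]
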